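-- pv_equiv track=rewrite | github.com/SigmanticAI/VerifEval | uvm_translator/validator.py | auto_fix
-- ===== SOURCE A (Python) =====
-- def auto_fix(content: str) -> str:
--     """
--     Attempt to auto-fix common issues in translated code.
--
--     Args:
--         content: Python source code
--
--     Returns:
--         Fixed code (or original if no fixes needed)
--     """
--     lines = content.split('\n')
--     fixed_lines = []
--
--     # Track if we've added imports
--     has_cocotb_import = False
--     has_clock_import = False
--     has_triggers_import = False
--
--     for line in lines:
--         if 'import cocotb' in line:
--             has_cocotb_import = True
--         if 'from cocotb.clock' in line:
--             has_clock_import = True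
--         if 'from cocotb.triggers' in line:
--             has_triggers_import = True
--         fixed_lines.append(line)
--
--     # Add missing imports at the top
--     imports_to_add = []
--
--     if not has_cocotb_import:
--         imports_to_add.append('import cocotb')
--     if not has_clock_import and 'Clock(' in content:
--         imports_to_add.append('from cocotb.clock import Clock')
--     if not has_triggers_import and any(t in content for t in ['RisingEdge', 'FallingEdge', 'Timer', 'ClockCycles']):
--         imports_to_add.append('from cocotb.triggers import RisingEdge, FallingEdge, Timer, ClockCycles')
--
--     if imports_to_add:
--         # Find first non-comment, non-empty line
--         insert_idx = 0
--         for i, line in enumerate(fixed_lines):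
--             if line.strip() and not line.strip().startswith('#') and not line.strip().startswith('"""'):
--                 insert_idx = i
--                 break
--
--         # Insert imports
--         for imp in reversed(imports_to_add):
--             fixed_lines.insert(insert_idx, imp)
--
--     return '\n'.join(fixed_lines)
-- ===== SOURCE B (Python) =====
-- def auto_fix(content: str) -> str:
--     """Add missing cocotb imports; whole-string detection, early return,
--     streaming splice of the import block instead of index search + inserts."""
--     imports = []
--     if 'import cocotb' not in content:
--         imports.append('import cocotb')
--     if 'from cocotb.clock' not in content and 'Clock(' in content:
--         imports.append('from cocotb.clock import Clock')
--     if 'from cocotb.triggers' not in content and any(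
--             t in content for t in ('RisingEdge', 'FallingEdge', 'Timer', 'ClockCycles')):
--         imports.append('from cocotb.triggers import RisingEdge, FallingEdge, Timer, ClockCycles')
--     if not imports:
--         return content
--     prefix, rest = [], content.split('\n')
--     while rest:
--         s = rest[0].strip()
--         if s and not s.startswith('#') and not s.startswith('"""'):
--             return '\n'.join(prefix + imports + rest)
--         prefix.append(rest.pop(0))
--     return '\n'.join(imports + prefix)
-- ===== Notes on version B (the rewrite author's own statement) =====
-- stated objective: alternative
-- what changed: Drops A's flag-tracking line-scanning loop (detection is done by whole-string substring tests, valid since no marker spans a newline), returns early when nothing is missing, and splices the import block while streaming lines into a prefix with an in-loop return instead of A's find-index-then-reversed-inserts.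
import Mathlib
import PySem

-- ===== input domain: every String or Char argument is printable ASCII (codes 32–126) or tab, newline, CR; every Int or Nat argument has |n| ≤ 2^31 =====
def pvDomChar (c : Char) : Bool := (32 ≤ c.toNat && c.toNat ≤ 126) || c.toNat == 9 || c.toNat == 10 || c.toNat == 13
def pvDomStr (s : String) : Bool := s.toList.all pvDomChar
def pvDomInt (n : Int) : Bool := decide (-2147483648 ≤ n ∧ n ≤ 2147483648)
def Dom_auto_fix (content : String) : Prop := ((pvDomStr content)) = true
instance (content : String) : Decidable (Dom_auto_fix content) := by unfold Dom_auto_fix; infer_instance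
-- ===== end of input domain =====

-- B drops A's flag-tracking line-scanning loop (whole-string substring tests instead — no
-- marker spans a newline), returns early when nothing is missing, and splices the import
-- block while streaming lines into a prefix, instead of find-index-then-reversed-inserts.

-- ===== PORT A =====

-- first non-empty line that is not a comment and does not start with '"""' (A's break-loop)
def pvFirstGoodA : List String → Nat → Nat
  | [], _ => 0
  | line :: rest, i =>
      if PySem.Str.strip line ≠ "" && !(PySem.Str.startswith (PySem.Str.strip line) "#")
          && !(PySem.Str.startswith (PySem.Str.strip line) "\"\"\"") then i
      else pvFirstGoodA rest (i + 1)

def auto_fix (content : String) : String :=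
  let lines := (PySem.Str.split? content "\n").getD []
  -- the for-loop: three flags plus fixed_lines.append(line)
  let st := lines.foldl
    (fun (st : Bool × Bool × Bool × List String) line =>
      (st.1 || PySem.Str.isIn "import cocotb" line,
       st.2.1 || PySem.Str.isIn "from cocotb.clock" line,
       st.2.2.1 || PySem.Str.isIn "from cocotb.triggers" line,
       st.2.2.2 ++ [line]))
    (false, false, false, [])
  let fixedLines := st.2.2.2
  let imports0 : List String := []
  let imports1 := if !st.1 then imports0 ++ ["import cocotb"] else imports0
  let imports2 := if !st.2.1 && PySem.Str.isIn "Clock(" content then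
      imports1 ++ ["from cocotb.clock import Clock"] else imports1
  let imports3 := if !st.2.2.1 &&
      (["RisingEdge", "FallingEdge", "Timer", "ClockCycles"].any
        (fun t => PySem.Str.isIn t content)) then
      imports2 ++ ["from cocotb.triggers import RisingEdge, FallingEdge, Timer, ClockCycles"]
    else imports2
  if imports3 ≠ [] then
    let insertIdx := pvFirstGoodA fixedLines 0
    let fixedLines' := imports3.reverse.foldl
      (fun fl imp => PySem.List.insert fl (insertIdx : Int) imp) fixedLines
    PySem.Str.join "\n" fixedLines'
  else
    PySem.Str.join "\n" fixedLines

-- ===== PORT B =====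

-- B's while-loop: stream lines into `prefix`, return from inside the loop at the first
-- code line (the joined splice), or after exhaustion (imports in front of everything)
def pvSpliceB (imports : List String) : List String → List String → String
  | pre, [] => PySem.Str.join "\n" (imports ++ pre)
  | pre, r :: rest =>
      if PySem.Str.strip r ≠ "" && !(PySem.Str.startswith (PySem.Str.strip r) "#")
          && !(PySem.Str.startswith (PySem.Str.strip r) "\"\"\"") then
        PySem.Str.join "\n" (pre ++ imports ++ (r :: rest))
      else pvSpliceB imports (pre ++ [r]) rest

def auto_fix_alt (content : String) : String :=
  let imports0 : List String := []
  let imports1 := if !PySem.Str.isIn "import cocotb" content then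
      imports0 ++ ["import cocotb"] else imports0
  let imports2 := if !PySem.Str.isIn "from cocotb.clock" content
      && PySem.Str.isIn "Clock(" content then
      imports1 ++ ["from cocotb.clock import Clock"] else imports1
  let imports3 := if !PySem.Str.isIn "from cocotb.triggers" content &&
      (["RisingEdge", "FallingEdge", "Timer", "ClockCycles"].any
        (fun t => PySem.Str.isIn t content)) then
      imports2 ++ ["from cocotb.triggers import RisingEdge, FallingEdge, Timer, ClockCycles"]
    else imports2
  if imports3 = [] then content
  else pvSpliceB imports3 [] ((PySem.Str.split? content "\n").getD [])

-- ===== PRECONDITION & SPEC =====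
def Spec_auto_fix (content : String) (out : String) : Prop := out = auto_fix_alt content
instance (content : String) (out : String) : Decidable (Spec_auto_fix content out) := by unfold Spec_auto_fix; infer_instance

-- ===== CLAIM (what is proved, stated in full; the proofs are below) =====
def Claim_equal_auto_fix : Prop := ∀ (content : String), Dom_auto_fix content → Spec_auto_fix content (auto_fix content)

-- ===== LEMMAS AND PROOFS =====

-- the common line predicate (A's break-loop test = B's in-loop test, de Morgan'd)
def pvGoodB (line : String) : Bool :=
  PySem.Str.strip line ≠ "" &&
    !(PySem.Str.startswith (PySem.Str.strip line) "#"
      || PySem.Str.startswith (PySem.Str.strip line) "\"\"\"")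

theorem pv_cond_eq (l : String) :
    ((PySem.Str.strip l ≠ "" : Bool) && !(PySem.Str.startswith (PySem.Str.strip l) "#")
        && !(PySem.Str.startswith (PySem.Str.strip l) "\"\"\"")) = pvGoodB l := by
  simp only [pvGoodB, Bool.not_or, Bool.and_assoc]

-- A's flag-and-append loop computes the three `any`s and copies the lines
theorem pv_fold_flags (lines : List String) (b1 b2 b3 : Bool) (acc : List String) :
    lines.foldl
      (fun (st : Bool × Bool × Bool × List String) line =>
        (st.1 || PySem.Str.isIn "import cocotb" line,
         st.2.1 || PySem.Str.isIn "from cocotb.clock" line,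
         st.2.2.1 || PySem.Str.isIn "from cocotb.triggers" line,
         st.2.2.2 ++ [line])) (b1, b2, b3, acc) =
      (b1 || lines.any (fun l => PySem.Str.isIn "import cocotb" l),
       b2 || lines.any (fun l => PySem.Str.isIn "from cocotb.clock" l),
       b3 || lines.any (fun l => PySem.Str.isIn "from cocotb.triggers" l),
       acc ++ lines) := by
  induction lines generalizing b1 b2 b3 acc with
  | nil => simp
  | cons l rest ih =>
      simp only [List.foldl_cons, ih, List.any_cons, Bool.or_assoc, List.append_assoc,
        List.singleton_append]

-- A's break-loop is findIdx?, shifted by the running counter (absent => 0, whatever the start)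
theorem pv_firstGood_eq (lines : List String) (i : Nat) :
    pvFirstGoodA lines i =
      (match lines.findIdx? pvGoodB with
        | some j => j + i
        | none => 0) := by
  induction lines generalizing i with
  | nil => simp [pvFirstGoodA]
  | cons l rest ih =>
      rw [pvFirstGoodA.eq_def]
      simp only [pv_cond_eq, List.findIdx?_cons]
      cases h : pvGoodB l with
      | true => simp
      | false =>
          simp only [Bool.false_eq_true, if_false, ih]
          cases hf : rest.findIdx? pvGoodB with
          | none => simp
          | some j =>
              simp only [Option.map_some]
              show j + (i + 1) = j + 1 + i
              omega

theorem pv_firstGood_zero (lines : List String) :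
    pvFirstGoodA lines 0 = (lines.findIdx? pvGoodB).getD 0 := by
  rw [pv_firstGood_eq]
  cases lines.findIdx? pvGoodB <;> simp

theorem pv_idx_le (lines : List String) :
    (lines.findIdx? pvGoodB).getD 0 ≤ lines.length := by
  cases hf : lines.findIdx? pvGoodB with
  | none => simp
  | some j =>
      have := List.findIdx?_eq_some_iff_findIdx_eq.mp hf
      simp only [Option.getD_some]
      omega

-- list.insert at an in-range index just after that prefix is a cons there
theorem pv_insert_after_take (xs ys : List String) (idx : Nat) (h : idx ≤ xs.length)
    (v : String) :
    PySem.List.insert (xs.take idx ++ ys) (idx : Int) v = xs.take idx ++ v :: ys := by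
  have hlen : idx ≤ (xs.take idx ++ ys).length := by
    simp [List.length_take]
    omega
  rw [PySem.List.insert_natCast _ idx v hlen]
  have htake : (xs.take idx ++ ys).take idx = xs.take idx := by
    rw [List.take_append_of_le_length (by simp [List.length_take]; omega)]
    simp [List.take_take]
  have hdrop : (xs.take idx ++ ys).drop idx = ys := by
    rw [List.drop_append_of_le_length (by simp [List.length_take]; omega)]
    simp
  rw [htake, hdrop]

-- ---- split('\n') structure: a clean cons-recursion for PySem.Chars.splitOn on a 1-char sep ----

def pvSplit1 (c : Char) : List Char → List (List Char)
  | [] => [[]]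
  | a :: rest => if a = c then [] :: pvSplit1 c rest
      else (pvSplit1 c rest).modifyHead (a :: ·)

theorem pv_modifyHead_triv (l : List (List Char)) :
    List.modifyHead (fun x => x) l = l := by
  cases l <;> simp

theorem pv_go_eq (c : Char) (fuel : Nat) : ∀ (l cur : List Char) (acc : List (List Char)) (_ : l.length < fuel),
    PySem.Chars.splitOn.go [c] fuel l cur acc =
      acc.reverse ++ (pvSplit1 c l).modifyHead (cur.reverse ++ ·) := by
  induction fuel with
  | zero => intro l cur acc h; omega
  | succ fuel ih =>
      intro l cur acc h
      cases l with
      | nil =>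
          rw [PySem.Chars.splitOn.go.eq_def]
          simp [pvSplit1]
      | cons a rest =>
          rw [PySem.Chars.splitOn.go.eq_def]
          by_cases hac : a = c
          · subst hac
            have hp : List.isPrefixOf [a] (a :: rest) = true := by
              simp [List.isPrefixOf]
            simp only [hp, if_true, List.length_cons, List.drop_succ_cons, List.length_nil, List.drop_zero]
            rw [ih rest [] (cur.reverse :: acc) (by simpa using Nat.lt_of_succ_lt_succ h)]
            simp [pvSplit1, pv_modifyHead_triv]
          · have hp : List.isPrefixOf [c] (a :: rest) = false := by
              simp [List.isPrefixOf]
              intro hca; exact hac hca.symm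
            simp only [hp, Bool.false_eq_true, if_false]
            rw [ih rest (a :: cur) acc (by simpa using Nat.lt_of_succ_lt_succ h)]
            simp only [pvSplit1, hac, if_false, List.modifyHead_modifyHead]
            congr 2
            funext x
            simp

theorem pv_splitOn_eq (c : Char) (cs : List Char) :
    PySem.Chars.splitOn cs [c] = pvSplit1 c cs := by
  rw [PySem.Chars.splitOn, pv_go_eq c (cs.length + 1) cs [] [] (by omega)]
  simp [pv_modifyHead_triv]

theorem pv_split1_ne_nil (c : Char) (cs : List Char) : pvSplit1 c cs ≠ [] := by
  cases cs with
  | nil => simp [pvSplit1]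
  | cons a rest =>
      simp only [pvSplit1]
      split
      · simp
      · cases h : pvSplit1 c rest with
        | nil => exact absurd h (pv_split1_ne_nil c rest)
        | cons p ps => simp

theorem pv_join_cons (sep a : List Char) (p : List Char) (ps : List (List Char)) :
    PySem.Chars.join sep ((a ++ p) :: ps) = a ++ PySem.Chars.join sep (p :: ps) := by
  cases ps with
  | nil => simp [PySem.Chars.join_singleton]
  | cons q qs => simp [PySem.Chars.join_cons_cons, List.append_assoc]

-- split then join with the separator is the identity
theorem pv_join_split (c : Char) (cs : List Char) :
    PySem.Chars.join [c] (pvSplit1 c cs) = cs := by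
  induction cs with
  | nil => simp [pvSplit1, PySem.Chars.join_singleton]
  | cons a rest ih =>
      by_cases hac : a = c
      · subst hac
        simp only [pvSplit1, if_true]
        cases h : pvSplit1 a rest with
        | nil => exact absurd h (pv_split1_ne_nil a rest)
        | cons p ps =>
            rw [PySem.Chars.join_cons_cons]
            rw [h] at ih
            simp [ih]
      · simp only [pvSplit1, hac, if_false]
        cases h : pvSplit1 c rest with
        | nil => exact absurd h (pv_split1_ne_nil c rest)
        | cons p ps =>
            rw [h] at ih
            have : (p :: ps).modifyHead (a :: ·) = ([a] ++ p) :: ps := by simp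
            rw [this, pv_join_cons [c] [a] p ps]
            simp [ih]

-- the head piece is the sep-free prefix: either the whole string (no sep) or up to the first sep
theorem pv_split1_decomp (c : Char) (cs : List Char) :
    ∃ p ps, pvSplit1 c cs = p :: ps ∧ c ∉ p ∧
      ((ps = [] ∧ cs = p) ∨ ∃ rest', cs = p ++ c :: rest' ∧ pvSplit1 c rest' = ps) := by
  induction cs with
  | nil => exact ⟨[], [], by simp [pvSplit1], by simp, Or.inl ⟨rfl, rfl⟩⟩
  | cons a rest ih =>
      by_cases hac : a = c
      · subst hac
        exact ⟨[], pvSplit1 a rest, by simp [pvSplit1], by simp,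
          Or.inr ⟨rest, by simp, rfl⟩⟩
      · obtain ⟨p, ps, hs, hcp, hrest⟩ := ih
        refine ⟨a :: p, ps, by simp [pvSplit1, hac, hs], by simp [hcp]; intro h; exact hac h.symm, ?_⟩
        rcases hrest with ⟨h1, h2⟩ | ⟨rest', h1, h2⟩
        · exact Or.inl ⟨h1, by simp [h2]⟩
        · exact Or.inr ⟨rest', by simp [h1], h2⟩

-- an infix avoiding the separator lives in one of the pieces
theorem pv_infix_split (c : Char) (m : List Char) (hm : c ∉ m) : ∀ (cs : List Char),
    ((∃ p ∈ pvSplit1 c cs, m <:+: p) ↔ m <:+: cs) := by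
  intro cs
  induction cs with
  | nil => simp [pvSplit1]
  | cons a rest ih =>
      by_cases hac : a = c
      · subst hac
        simp only [pvSplit1, if_true, List.mem_cons]
        constructor
        · rintro ⟨p, hp | hp, hinf⟩
          · subst hp
            rw [List.infix_nil] at hinf
            subst hinf
            exact List.nil_infix
          · exact List.infix_cons_iff.mpr (Or.inr (ih.mp ⟨p, hp, hinf⟩))
        · intro h
          rcases List.infix_cons_iff.mp h with h | h
          · cases m with
            | nil => exact ⟨[], Or.inl rfl, List.nil_infix⟩
            | cons b m' =>
                obtain ⟨hb, _⟩ := List.cons_prefix_cons.mp h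
                exact absurd (hb ▸ List.mem_cons_self) hm
          · obtain ⟨p, hp, hinf⟩ := ih.mpr h
            exact ⟨p, Or.inr hp, hinf⟩
      · obtain ⟨p, ps, hs, hcp, hrest⟩ := pv_split1_decomp c rest
        have hsplit : pvSplit1 c (a :: rest) = (a :: p) :: ps := by
          simp [pvSplit1, hac, hs]
        rw [hsplit]
        rw [hs] at ih
        constructor
        · rintro ⟨q, hq, hinf⟩
          rcases List.mem_cons.mp hq with rfl | hq
          · rcases List.infix_cons_iff.mp hinf with h | h
            · have hpr : p <+: rest := by
                rcases hrest with ⟨_, h2⟩ | ⟨rest', h1, _⟩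
                · exact h2 ▸ List.prefix_refl p
                · exact h1 ▸ ⟨c :: rest', rfl⟩
              exact (h.trans (List.cons_prefix_cons.mpr ⟨rfl, hpr⟩)).isInfix
            · exact List.infix_cons_iff.mpr
                (Or.inr (ih.mp ⟨p, List.mem_cons_self, h⟩))
          · exact List.infix_cons_iff.mpr (Or.inr (ih.mp ⟨q, List.mem_cons.mpr (Or.inr hq), hinf⟩))
        · intro h
          rcases List.infix_cons_iff.mp h with h | h
          · cases m with
            | nil => exact ⟨a :: p, List.mem_cons_self, List.nil_infix⟩
            | cons b m' =>
                obtain ⟨hb, hm'⟩ := List.cons_prefix_cons.mp h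
                rcases hrest with ⟨h1, h2⟩ | ⟨rest', h1, _⟩
                · exact ⟨a :: p, List.mem_cons_self,
                    (List.cons_prefix_cons.mpr ⟨hb, h2 ▸ hm'⟩).isInfix⟩
                · have hmc : c ∉ m' := fun hc => hm (List.mem_cons.mpr (Or.inr hc))
                  have hlen : m'.length ≤ p.length := by
                    by_contra hlen
                    have hcm : c ∈ m' := by
                      have h2 := h1 ▸ hm'
                      obtain ⟨t, ht⟩ := h2
                      have e1 : (m' ++ t)[p.length]'(by simp; omega) =
                          m'[p.length]'(by omega) :=
                        List.getElem_append_left (by omega)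
                      have e2 : (m' ++ t)[p.length]'(by simp; omega) = c := by
                        simp only [ht]
                        simp
                      have hg : m'[p.length]'(by omega) = c := by
                        rw [← e1]; exact e2
                      exact hg ▸ List.getElem_mem _
                    exact hmc hcm
                  have hmp : m' <+: p :=
                    List.prefix_of_prefix_length_le (h1 ▸ hm') ⟨c :: rest', rfl⟩ hlen
                  exact ⟨a :: p, List.mem_cons_self,
                    (List.cons_prefix_cons.mpr ⟨hb, hmp⟩).isInfix⟩
          · obtain ⟨q, hq, hinf⟩ := ih.mpr h
            rcases List.mem_cons.mp hq with rfl | hq2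
            · exact ⟨a :: q, List.mem_cons_self,
                hinf.trans (List.suffix_cons a q).isInfix⟩
            · exact ⟨q, List.mem_cons.mpr (Or.inr hq2), hinf⟩

-- ---- String-level corollaries about lines = content.split('\n') ----

theorem pv_lines_eq (content : String) :
    (PySem.Str.split? content "\n").getD [] =
      (pvSplit1 '\n' content.toList).map String.ofList := by
  simp [PySem.Str.split?, PySem.Chars.split?, pv_splitOn_eq]

-- whole-string membership = per-line membership, for a pattern without newline
theorem pv_any_lines (content : String) (m : String) (hm : '\n' ∉ m.toList) :
    ((PySem.Str.split? content "\n").getD []).any (fun l => PySem.Str.isIn m l) =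
      PySem.Str.isIn m content := by
  rw [pv_lines_eq, List.any_map]
  cases h : PySem.Str.isIn m content with
  | true =>
      have := (PySem.Str.isIn_iff_infix m content).mp h
      obtain ⟨p, hp, hinf⟩ := (pv_infix_split '\n' m.toList hm content.toList).mpr this
      simp only [List.any_eq_true]
      exact ⟨p, hp, by simp [PySem.Str.isIn, PySem.Chars.isIn_iff_infix, hinf]⟩
  | false =>
      simp only [List.any_eq_false]
      intro p hp
      simp only [Function.comp_apply, PySem.Str.isIn, String.toList_ofList]
      intro hc
      have hinf := (PySem.Chars.isIn_iff_infix _ _).mp hc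
      have := (pv_infix_split '\n' m.toList hm content.toList).mp ⟨p, hp, hinf⟩
      rw [← PySem.Str.isIn_iff_infix] at this
      simp only [PySem.Str.isIn] at h this
      rw [h] at this
      exact Bool.noConfusion this

-- '\n'.join(content.split('\n')) == content
theorem pv_join_lines (content : String) :
    PySem.Str.join "\n" ((PySem.Str.split? content "\n").getD []) = content := by
  rw [pv_lines_eq, PySem.Str.join]
  have h1 : (("\n" : String)).toList = ['\n'] := by decide
  rw [h1, List.map_map]
  have h2 : List.map (String.toList ∘ String.ofList) (pvSplit1 '\n' content.toList)
      = pvSplit1 '\n' content.toList := by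
    simp [Function.comp_def]
  rw [h2, pv_join_split]
  simp

-- B's splice loop = the take/insert/drop decomposition at the first good line
theorem pv_spliceB_eq (imports : List String) : ∀ (rest pre : List String),
    pvSpliceB imports pre rest =
      match rest.findIdx? pvGoodB with
      | some j => PySem.Str.join "\n" (pre ++ rest.take j ++ imports ++ rest.drop j)
      | none => PySem.Str.join "\n" (imports ++ pre ++ rest) := by
  intro rest
  induction rest with
  | nil => intro pre; simp [pvSpliceB]
  | cons r rest ih =>
      intro pre
      rw [pvSpliceB.eq_def]
      simp only [pv_cond_eq, List.findIdx?_cons]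
      cases h : pvGoodB r with
      | true => simp
      | false =>
          simp only [Bool.false_eq_true, if_false, ih]
          cases hf : rest.findIdx? pvGoodB with
          | none => simp
          | some j => simp [List.append_assoc]

-- ===== VERDICT (by name: the statement is the Claim_ definition above) =====
theorem auto_fix_spec : Claim_equal_auto_fix := by
  intro content _
  show auto_fix content = auto_fix_alt content
  unfold auto_fix auto_fix_alt
  simp only [pv_fold_flags, Bool.false_or, List.nil_append, pv_firstGood_zero]
  rw [pv_any_lines content "import cocotb" (by decide),
    pv_any_lines content "from cocotb.clock" (by decide),
    pv_any_lines content "from cocotb.triggers" (by decide)]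
  set lines := (PySem.Str.split? content "\n").getD [] with hlines
  set idx := (lines.findIdx? pvGoodB).getD 0 with hidx
  have hle : idx ≤ lines.length := pv_idx_le lines
  have e2 : ∀ (ys : List String) (v : String),
      PySem.List.insert (lines.take idx ++ ys) (idx : Int) v =
        lines.take idx ++ v :: ys := fun ys v =>
    pv_insert_after_take lines ys idx hle v
  have hfold : ∀ imps : List String,
      imps.reverse.foldl (fun fl imp => PySem.List.insert fl (idx : Int) imp) lines =
        lines.take idx ++ imps ++ lines.drop idx := by
    intro imps
    induction imps with
    | nil => simp
    | cons v t ih =>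
        rw [List.reverse_cons, List.foldl_append, ih]
        simp only [List.foldl_cons, List.foldl_nil, List.append_assoc]
        rw [e2 (t ++ lines.drop idx) v]
        simp
  have hsplice : ∀ imports : List String, pvSpliceB imports [] lines =
      PySem.Str.join "\n" (lines.take idx ++ imports ++ lines.drop idx) := by
    intro imports
    rw [pv_spliceB_eq]
    cases hf : lines.findIdx? pvGoodB with
    | none => simp [hidx, hf]
    | some j => simp [hidx, hf]
  have hjoin : PySem.Str.join "\n" lines = content := by
    rw [hlines]; exact pv_join_lines content
  have hfold' : ∀ imps : List String,
      imps.foldl (fun fl imp => PySem.List.insert fl (idx : Int) imp) lines =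
        lines.take idx ++ imps.reverse ++ lines.drop idx := by
    intro imps
    have h := hfold imps.reverse
    rw [List.reverse_reverse] at h
    exact h
  generalize (PySem.Str.isIn "import cocotb" content) = c1
  generalize (PySem.Str.isIn "from cocotb.clock" content) = c2
  generalize (PySem.Str.isIn "from cocotb.triggers" content) = c3
  generalize (PySem.Str.isIn "Clock(" content) = k1
  generalize (["RisingEdge", "FallingEdge", "Timer", "ClockCycles"].any
    (fun t => PySem.Str.isIn t content)) = k2
  cases c1 <;> cases c2 <;> cases c3 <;> cases k1 <;> cases k2 <;>
    simp [hfold', hsplice, hjoin]
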